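-- pv_equiv track=rewrite | github.com/15520598/Information_Retrieval | BM25.py | CreateDictTermDocumentCount
-- ===== SOURCE A (Python) =====
-- def CreateDictTermDocumentCount(list_Term, dict_Document):
-- 	dict_DocumentSet = {}
-- 	dict_TermDocFreq = {}
-- 	for term in list_Term:
-- 		dict_TermDocFreq[term] = 0
-- 	for key, document in dict_Document.items():
-- 		dict_DocumentSet[key] = {}
-- 		list_Term = list(set(document))
-- 		list_Term.sort()
-- 		for term in list_Term:
-- 			freq = document.count(term)
-- 			dict_DocumentSet[key][term] = freq
-- 			dict_TermDocFreq[term] += 1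
-- 	return dict_DocumentSet, dict_TermDocFreq
-- ===== SOURCE B (Python) =====
-- def _runs(srt):
--     # run-length encode an already-sorted list: [(value, run length), ...]
--     if not srt:
--         return []
--     head = srt[0]
--     rest = srt[1:]
--     i = 0
--     while i < len(rest) and rest[i] == head:
--         i += 1
--     return [(head, 1 + i)] + _runs(rest[i:])
--
--
-- def CreateDictTermDocumentCount(list_Term, dict_Document):
--     dict_DocumentSet = {}
--     for key, document in dict_Document.items():
--         dict_DocumentSet[key] = dict(_runs(sorted(document)))
--     dict_TermDocFreq = dict.fromkeys(list_Term, 0)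
--     for freqs in dict_DocumentSet.values():
--         for term in freqs:
--             dict_TermDocFreq[term] += 1
--     return dict_DocumentSet, dict_TermDocFreq
-- ===== Notes on version B (the rewrite author's own statement) =====
-- stated objective: alternative
-- what changed: Each per-document table is built by sorting the whole document once and run-length encoding the sorted list (a recursive scan emitting (term, run length) pairs), instead of sorting the deduplicated word set and calling document.count for every distinct term; the document-frequency table is then derived in a separate second pass over the already-built tables instead of being incremented inline.
-- outside the precondition, e.g. on CreateDictTermDocumentCount([], {'d': ['w']}): A raises KeyError, B raises KeyError
import Mathlib
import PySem

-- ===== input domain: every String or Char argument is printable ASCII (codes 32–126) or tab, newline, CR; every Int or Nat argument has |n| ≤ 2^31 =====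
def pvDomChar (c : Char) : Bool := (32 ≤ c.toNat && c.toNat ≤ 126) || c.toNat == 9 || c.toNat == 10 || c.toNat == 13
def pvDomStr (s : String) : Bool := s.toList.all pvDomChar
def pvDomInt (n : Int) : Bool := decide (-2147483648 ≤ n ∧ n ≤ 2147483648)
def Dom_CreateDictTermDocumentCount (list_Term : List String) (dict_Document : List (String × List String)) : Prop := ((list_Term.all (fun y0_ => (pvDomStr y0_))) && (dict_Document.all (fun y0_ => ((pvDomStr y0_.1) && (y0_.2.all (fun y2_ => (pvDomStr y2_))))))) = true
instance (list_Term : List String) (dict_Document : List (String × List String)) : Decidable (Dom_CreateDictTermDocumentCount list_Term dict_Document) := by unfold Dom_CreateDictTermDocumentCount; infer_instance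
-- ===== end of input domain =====

-- B sorts each document once and run-length encodes the sorted list into the per-document
-- frequency table (no per-term count scan and no set), then derives the document-frequency
-- table in a separate second pass over the built tables (alternative algorithm).

-- ===== PORT A =====
-- 'dict_TermDocFreq[term] += 1' raises KeyError when term is missing; ported with Dict.modify,
-- exact under Pre_ (every document word is in list_Term).
def CreateDictTermDocumentCount (list_Term : List String) (dict_Document : List (String × List String)) :
    (List (String × List (String × Int))) × (List (String × Int)) :=
  let dict_TermDocFreq : PySem.Dict String Int :=
    list_Term.foldl (fun d term => d.insert term 0) ⟨[]⟩
  let res :=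
    dict_Document.foldl
      (fun (st : PySem.Dict String (PySem.Dict String Int) × PySem.Dict String Int) kv =>
        let terms := PySem.List.sorted (PySem.Set.ofList kv.2) (fun x => x) false
        let it :=
          terms.foldl
            (fun (p : PySem.Dict String Int × PySem.Dict String Int) term =>
              (p.1.insert term ((PySem.List.count kv.2 term : Int)),
               p.2.modify term 0 (· + 1)))
            (⟨[]⟩, st.2)
        (st.1.insert kv.1 it.1, it.2))
      ((⟨[]⟩ : PySem.Dict String (PySem.Dict String Int)), dict_TermDocFreq)
  (res.1.items.map (fun p => (p.1, p.2.items)), res.2.items)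

-- ===== PORT B =====
-- _runs of Source B: the index-advancing 'while i < len(rest) and rest[i] == head' scan and the
-- slice 'rest[i:]' are exactly takeWhile-length and dropWhile on the same list.
def pvRunsB : List String → List (String × Int)
  | [] => []
  | x :: xs =>
    (x, 1 + ((xs.takeWhile (fun y => y == x)).length : Int)) ::
      pvRunsB (xs.dropWhile (fun y => y == x))
termination_by l => l.length
decreasing_by
  have := List.length_dropWhile_le (fun y => y == x) xs
  simp only [List.length_cons]
  omega

-- 'dict.fromkeys(list_Term, 0)' is the insert-0 fold; the '+= 1' KeyError is as in A, exact under Pre_.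
def CreateDictTermDocumentCount_alt (list_Term : List String) (dict_Document : List (String × List String)) :
    (List (String × List (String × Int))) × (List (String × Int)) :=
  let ds : PySem.Dict String (PySem.Dict String Int) :=
    dict_Document.foldl
      (fun acc kv =>
        acc.insert kv.1 (PySem.Dict.ofList (pvRunsB (PySem.List.sorted kv.2 (fun x => x) false))))
      PySem.Dict.empty
  let tdf0 : PySem.Dict String Int := list_Term.foldl (fun d term => d.insert term 0) ⟨[]⟩
  let tdf :=
    ds.values.foldl (fun d fr => fr.keys.foldl (fun d t => d.modify t 0 (· + 1)) d) tdf0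
  (ds.items.map (fun p => (p.1, p.2.items)), tdf.items)

-- ===== PRECONDITION & SPEC =====
-- Pre_ excludes (a) association lists with duplicate keys, which do not represent a Python dict
-- (fed the collapsed dict, both programs return the same value), and (b) inputs where some
-- document word is missing from list_Term, on which A (and B) raises KeyError.
def Pre_CreateDictTermDocumentCount (list_Term : List String) (dict_Document : List (String × List String)) : Prop :=
  (dict_Document.map Prod.fst).Nodup ∧ ∀ p ∈ dict_Document, ∀ w ∈ p.2, w ∈ list_Term
instance (list_Term : List String) (dict_Document : List (String × List String)) : Decidable (Pre_CreateDictTermDocumentCount list_Term dict_Document) := by unfold Pre_CreateDictTermDocumentCount; infer_instance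

def pvWitness_CreateDictTermDocumentCount : List String × (List (String × List String)) :=
  (["a", "b"], [("d1", ["a", "a", "b"]), ("d2", ["b"])])

def Spec_CreateDictTermDocumentCount (list_Term : List String) (dict_Document : List (String × List String)) (out : (List (String × List (String × Int))) × (List (String × Int))) : Prop := out = CreateDictTermDocumentCount_alt list_Term dict_Document
instance (list_Term : List String) (dict_Document : List (String × List String)) (out : (List (String × List (String × Int))) × (List (String × Int))) : Decidable (Spec_CreateDictTermDocumentCount list_Term dict_Document out) := by unfold Spec_CreateDictTermDocumentCount; infer_instance

-- ===== CLAIM (what is proved, stated in full; the proofs are below) =====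
def Claim_equal_CreateDictTermDocumentCount : Prop := ∀ (list_Term : List String) (dict_Document : List (String × List String)), Dom_CreateDictTermDocumentCount list_Term dict_Document → Pre_CreateDictTermDocumentCount list_Term dict_Document → Spec_CreateDictTermDocumentCount list_Term dict_Document (CreateDictTermDocumentCount list_Term dict_Document)

-- ===== LEMMAS AND PROOFS =====

def pvTerms (doc : List String) : List String :=
  PySem.List.sorted (PySem.Set.ofList doc) (fun x => x) false

def pvInner (doc : List String) : PySem.Dict String Int :=
  (pvTerms doc).foldl (fun d t => d.insert t ((PySem.List.count doc t : Int))) ⟨[]⟩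

lemma pv_terms_nodup (doc : List String) : (pvTerms doc).Nodup := by
  unfold pvTerms
  exact ((PySem.List.sorted_perm _ _ _).nodup_iff).mpr (PySem.Set.nodup_ofList doc)

lemma pv_rest_gt : ∀ (xs : List String) (x t : String),
    (x :: xs).Pairwise (· ≤ ·) → t ∈ xs.dropWhile (fun y => y == x) → x < t := by
  intro xs
  induction xs with
  | nil => intro x t _ ht; simp at ht
  | cons y ys ih =>
    intro x t hpw ht
    by_cases hyx : y = x
    · subst hyx
      have hpw' : (y :: ys).Pairwise (· ≤ ·) := by
        rcases List.pairwise_cons.mp hpw with ⟨h1, h2⟩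
        exact List.pairwise_cons.mpr ⟨fun b hb => h1 b (List.mem_cons_of_mem _ hb), h2.tail⟩
      rw [List.dropWhile_cons_of_pos (by simp)] at ht
      exact ih y t hpw' ht
    · rw [List.dropWhile_cons_of_neg (by simp [hyx])] at ht
      rcases List.pairwise_cons.mp hpw with ⟨h1, h2⟩
      have hxy : x < y :=
        lt_of_le_of_ne (h1 y (List.mem_cons_self ..)) (fun h => hyx h.symm)
      rcases List.mem_cons.mp ht with h | h
      · exact h ▸ hxy
      · exact lt_of_lt_of_le hxy ((List.pairwise_cons.mp h2).1 t h)

lemma pv_runs_mem : ∀ (l : List String) (t : String),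
    t ∈ (pvRunsB l).map Prod.fst ↔ t ∈ l := by
  intro l
  induction l using pvRunsB.induct with
  | case1 => intro t; simp [pvRunsB]
  | case2 x xs ih =>
    intro t
    simp only [pvRunsB, List.map_cons, List.mem_cons, ih]
    constructor
    · rintro (h | h)
      · exact Or.inl h
      · exact Or.inr ((List.dropWhile_sublist _).mem h)
    · rintro (h | h)
      · exact Or.inl h
      · conv at h => rw [← List.takeWhile_append_dropWhile (p := fun y => y == x) (l := xs)]
        rcases List.mem_append.mp h with h | h
        · exact Or.inl (by simpa using List.mem_takeWhile_imp h)
        · exact Or.inr h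

lemma pv_runs_keys_lt : ∀ (l : List String), l.Pairwise (· ≤ ·) →
    ((pvRunsB l).map Prod.fst).Pairwise (· < ·) := by
  intro l
  induction l using pvRunsB.induct with
  | case1 => intro _; simp [pvRunsB]
  | case2 x xs ih =>
    intro hpw
    simp only [pvRunsB, List.map_cons]
    refine List.pairwise_cons.mpr ⟨?_, ?_⟩
    · intro t ht
      exact pv_rest_gt xs x t hpw ((pv_runs_mem _ t).mp ht)
    · exact ih (List.Pairwise.sublist ((List.dropWhile_sublist _).trans (List.sublist_cons_self _ _)) hpw)

lemma pv_runs_count : ∀ (l : List String), l.Pairwise (· ≤ ·) →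
    ∀ p ∈ pvRunsB l, p.2 = (List.count p.1 l : Int) := by
  intro l
  induction l using pvRunsB.induct with
  | case1 => intro _ p hp; simp [pvRunsB] at hp
  | case2 x xs ih =>
    intro hpw p hp
    simp only [pvRunsB, List.mem_cons] at hp
    have hsplit := List.takeWhile_append_dropWhile (p := fun y => y == x) (l := xs)
    rcases hp with h | h
    · subst h
      have htw : List.count x (xs.takeWhile (fun y => y == x))
          = (xs.takeWhile (fun y => y == x)).length :=
        List.count_eq_length.mpr (fun b hb => ((by simpa using List.mem_takeWhile_imp hb : b = x)).symm)
      have hrest : List.count x (xs.dropWhile (fun y => y == x)) = 0 :=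
        List.count_eq_zero.mpr (fun hmem => lt_irrefl x (pv_rest_gt xs x x hpw hmem))
      have hc : List.count x xs = (xs.takeWhile (fun y => y == x)).length := by
        conv_lhs => rw [← hsplit]
        rw [List.count_append, htw, hrest]
        omega
      dsimp only
      rw [List.count_cons_self, hc]
      push_cast
      ring
    · have hpw' : (xs.dropWhile (fun y => y == x)).Pairwise (· ≤ ·) :=
        List.Pairwise.sublist ((List.dropWhile_sublist _).trans (List.sublist_cons_self _ _)) hpw
      have h1 : p.1 ∈ xs.dropWhile (fun y => y == x) :=
        (pv_runs_mem _ p.1).mp (List.mem_map_of_mem h)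
      have hne : p.1 ≠ x := fun he => lt_irrefl x (he ▸ pv_rest_gt xs x p.1 hpw h1)
      have htw0 : List.count p.1 (xs.takeWhile (fun y => y == x)) = 0 :=
        List.count_eq_zero.mpr (fun hmem => hne (by simpa using List.mem_takeWhile_imp hmem))
      have hc2 : List.count p.1 xs = List.count p.1 (xs.dropWhile (fun y => y == x)) := by
        conv_lhs => rw [← hsplit]
        rw [List.count_append, htw0, Nat.zero_add]
      rw [ih hpw' p h, List.count_cons_of_ne (Ne.symm hne), hc2]

lemma pv_runs_sorted_eq (doc : List String) :
    pvRunsB (PySem.List.sorted doc (fun x => x) false)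
      = (pvTerms doc).map (fun t => (t, (PySem.List.count doc t : Int))) := by
  set s := PySem.List.sorted doc (fun x => x) false with hs
  have hpw : s.Pairwise (· ≤ ·) := PySem.List.sorted_pairwise doc (fun x => x)
  have hkeys : pvTerms doc = (pvRunsB s).map Prod.fst := by
    apply PySem.List.sorted_eq_of_perm_of_pairwise_lt
    · refine (List.perm_ext_iff_of_nodup ((pv_runs_keys_lt s hpw).nodup)
        (PySem.Set.nodup_ofList doc)).mpr (fun t => ?_)
      rw [pv_runs_mem s t, PySem.Set.mem_ofList]
      exact (PySem.List.mem_sorted doc _ false t)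
    · exact pv_runs_keys_lt s hpw
  have hself : pvRunsB s = (pvRunsB s).map (fun p => (p.1, (List.count p.1 s : Int))) := by
    conv_lhs => rw [← List.map_id (pvRunsB s)]
    exact List.map_congr_left (fun p hp => by
      rw [← pv_runs_count s hpw p hp]; rfl)
  rw [hself, hkeys, List.map_map]
  refine List.map_congr_left (fun p _ => ?_)
  simp only [Function.comp]
  rw [PySem.List.count_eq, (PySem.List.sorted_perm doc (fun x => x) false).count_eq p.1]

lemma pv_inner_items (doc : List String) :
    (pvInner doc).items = (pvTerms doc).map (fun t => (t, (PySem.List.count doc t : Int))) := by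
  unfold pvInner
  rw [PySem.Dict.items_foldl_insert_fresh (pvTerms doc) (fun t => t)
    (fun t => (PySem.List.count doc t : Int)) ⟨[]⟩
    (fun a _ => PySem.Dict.contains_empty a) (by simpa using pv_terms_nodup doc)]
  simp

lemma pv_inner_eq (doc : List String) :
    PySem.Dict.ofList (pvRunsB (PySem.List.sorted doc (fun x => x) false)) = pvInner doc := by
  apply PySem.Dict.ext
  rw [pv_inner_items]
  simp only [PySem.Dict.ofList, PySem.Dict.update]
  rw [PySem.Dict.items_foldl_insert_fresh _ Prod.fst Prod.snd PySem.Dict.empty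
    (fun a _ => PySem.Dict.contains_empty a.1) ?_]
  · rw [pv_runs_sorted_eq]; simp [PySem.Dict.empty]
  · rw [pv_runs_sorted_eq, List.map_map]
    simpa [Function.comp_def] using pv_terms_nodup doc

lemma pv_inner_keys (doc : List String) : (pvInner doc).keys = pvTerms doc := by
  show (pvInner doc).items.map Prod.fst = _
  rw [pv_inner_items, List.map_map]
  simp [Function.comp_def]

-- ===== VERDICT (by name: the statement is the Claim_ definition above) =====
theorem CreateDictTermDocumentCount_spec : Claim_equal_CreateDictTermDocumentCount := by
  intro lt dd _ hpre
  obtain ⟨hnodup, -⟩ := hpre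
  unfold Spec_CreateDictTermDocumentCount
  have hbodyA : (fun (st : PySem.Dict String (PySem.Dict String Int) × PySem.Dict String Int)
        (kv : String × List String) =>
      let terms := PySem.List.sorted (PySem.Set.ofList kv.2) (fun x => x) false
      let it :=
        terms.foldl
          (fun (p : PySem.Dict String Int × PySem.Dict String Int) term =>
            (p.1.insert term ((PySem.List.count kv.2 term : Int)),
             p.2.modify term 0 (· + 1)))
          (⟨[]⟩, st.2)
      (st.1.insert kv.1 it.1, it.2))
      = fun (st : PySem.Dict String (PySem.Dict String Int) × PySem.Dict String Int)
            (kv : String × List String) =>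
          (st.1.insert kv.1 (pvInner kv.2),
           (pvTerms kv.2).foldl
             (fun (q : PySem.Dict String Int) term => q.modify term 0 (· + 1)) st.2) := by
    funext st kv
    dsimp only
    rw [PySem.List.foldl_prod_mk
      (fun (p : PySem.Dict String Int) term => p.insert term ((PySem.List.count kv.2 term : Int)))
      (fun (q : PySem.Dict String Int) term => q.modify term 0 (· + 1))]
    rfl
  have hbodyB : (fun (acc : PySem.Dict String (PySem.Dict String Int)) (kv : String × List String) =>
      acc.insert kv.1 (PySem.Dict.ofList (pvRunsB (PySem.List.sorted kv.2 (fun x => x) false))))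
      = fun (acc : PySem.Dict String (PySem.Dict String Int)) (kv : String × List String) =>
          acc.insert kv.1 (pvInner kv.2) := by
    funext acc kv
    rw [pv_inner_eq kv.2]
  have hA : CreateDictTermDocumentCount lt dd
      = (fun res : PySem.Dict String (PySem.Dict String Int) × PySem.Dict String Int =>
          (List.map (fun p => (p.1, p.2.items)) res.1.items, res.2.items))
        (dd.foldl
          (fun (st : PySem.Dict String (PySem.Dict String Int) × PySem.Dict String Int)
              (kv : String × List String) =>
            let terms := PySem.List.sorted (PySem.Set.ofList kv.2) (fun x => x) false
            let it :=
              terms.foldl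
                (fun (p : PySem.Dict String Int × PySem.Dict String Int) term =>
                  (p.1.insert term ((PySem.List.count kv.2 term : Int)),
                   p.2.modify term 0 (· + 1)))
                (⟨[]⟩, st.2)
            (st.1.insert kv.1 it.1, it.2))
          (⟨[]⟩, lt.foldl (fun d term => d.insert term 0) ⟨[]⟩)) := rfl
  have hB : CreateDictTermDocumentCount_alt lt dd
      = (fun ds : PySem.Dict String (PySem.Dict String Int) =>
          (List.map (fun p => (p.1, p.2.items)) ds.items,
           (ds.values.foldl
              (fun (d : PySem.Dict String Int) (fr : PySem.Dict String Int) =>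
                fr.keys.foldl (fun (d : PySem.Dict String Int) t => d.modify t 0 (· + 1)) d)
              (lt.foldl (fun d term => d.insert term 0) ⟨[]⟩)).items))
        (dd.foldl
          (fun (acc : PySem.Dict String (PySem.Dict String Int)) (kv : String × List String) =>
            acc.insert kv.1 (PySem.Dict.ofList (pvRunsB (PySem.List.sorted kv.2 (fun x => x) false))))
          PySem.Dict.empty) := rfl
  rw [hA, hB, hbodyA, hbodyB]
  rw [PySem.List.foldl_prod_mk
    (fun (acc : PySem.Dict String (PySem.Dict String Int)) (kv : String × List String) =>
      acc.insert kv.1 (pvInner kv.2))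
    (fun (d : PySem.Dict String Int) (kv : String × List String) =>
      (pvTerms kv.2).foldl (fun (q : PySem.Dict String Int) term => q.modify term 0 (· + 1)) d)]
  have hds : (dd.foldl (fun acc kv => acc.insert kv.1 (pvInner kv.2))
      (PySem.Dict.empty : PySem.Dict String (PySem.Dict String Int))).items
      = dd.map (fun kv => (kv.1, pvInner kv.2)) := by
    rw [PySem.Dict.items_foldl_insert_fresh dd Prod.fst (fun kv => pvInner kv.2) PySem.Dict.empty
      (fun a _ => PySem.Dict.contains_empty a.1) hnodup]
    simp [PySem.Dict.empty]
  have hds' : (dd.foldl (fun acc kv => acc.insert kv.1 (pvInner kv.2))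
      (⟨[]⟩ : PySem.Dict String (PySem.Dict String Int))).items
      = dd.map (fun kv => (kv.1, pvInner kv.2)) := hds
  simp only [PySem.Dict.values]
  rw [hds', hds, List.map_map, List.foldl_map]
  rw [List.foldl_map]
  simp only [Function.comp_def, pv_inner_keys]
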